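-- pv_equiv track=rewrite | github.com/Ralf-Kemmann/Quantum-Spacetime-Bridge | scripts/run_bms_fu01c_c60_motif_topology_extension.py | graph_distance_shell_edges
-- ===== SOURCE A (Python) =====
-- from collections import Counter, defaultdict, deque
-- from typing import Any, Dict, List, Tuple, Set
--
-- Edge = Tuple[str, str]
--
-- def build_adjacency(edges: Dict[Edge, Dict[str, Any]]) -> Dict[str, Set[str]]:
--     adj: Dict[str, Set[str]] = defaultdict(set)
--     for a, b in edges:
--         adj[a].add(b)
--         adj[b].add(a)
--     return adj
--
-- def graph_distance_shell_edges(rep_edges: Dict[Edge, Dict[str, Any]], bond_edges: Dict[Edge, Dict[str, Any]], node_ids: List[str], shell_depth: int) -> Set[Edge]: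
--     anchor = "c60_001" if "c60_001" in node_ids else sorted(node_ids)[0]
--     adj = build_adjacency(bond_edges)
--     dist = {anchor: 0}
--     q = deque([anchor])
--     while q:
--         x = q.popleft()
--         for y in adj[x]:
--             if y not in dist:
--                 dist[y] = dist[x] + 1
--                 q.append(y)
--
--     shell_nodes = {n for n, d in dist.items() if d <= shell_depth}
--     return {e for e in rep_edges if e[0] in shell_nodes or e[1] in shell_nodes}
-- ===== SOURCE B (Python) =====
-- def graph_distance_shell_edges(rep_edges, bond_edges, node_ids, shell_depth):
--     anchor = "c60_001" if "c60_001" in node_ids else min(node_ids)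
--     adj = {}
--     for a, b in bond_edges:
--         adj.setdefault(a, []).append(b)
--         adj.setdefault(b, []).append(a)
--     if shell_depth < 0:
--         visited = set()
--     else:
--         visited = {anchor}
--         frontier = {anchor}
--         for _ in range(shell_depth):
--             if not frontier:
--                 break
--             frontier = {y for x in frontier for y in adj.get(x, []) if y not in visited}
--             visited |= frontier
--     return {(a, b) for (a, b) in rep_edges if a in visited or b in visited}
-- ===== Notes on version B (the rewrite author's own statement) =====
-- stated objective: alternative
-- what changed: A runs a full queue+distance-dict BFS over the whole component and then filters nodes by distance; B does a level-synchronous frontier expansion that runs only shell_depth rounds (stopping early when the frontier empties), so it maintains no distances and never visits nodes beyond the shell.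
import Mathlib
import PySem

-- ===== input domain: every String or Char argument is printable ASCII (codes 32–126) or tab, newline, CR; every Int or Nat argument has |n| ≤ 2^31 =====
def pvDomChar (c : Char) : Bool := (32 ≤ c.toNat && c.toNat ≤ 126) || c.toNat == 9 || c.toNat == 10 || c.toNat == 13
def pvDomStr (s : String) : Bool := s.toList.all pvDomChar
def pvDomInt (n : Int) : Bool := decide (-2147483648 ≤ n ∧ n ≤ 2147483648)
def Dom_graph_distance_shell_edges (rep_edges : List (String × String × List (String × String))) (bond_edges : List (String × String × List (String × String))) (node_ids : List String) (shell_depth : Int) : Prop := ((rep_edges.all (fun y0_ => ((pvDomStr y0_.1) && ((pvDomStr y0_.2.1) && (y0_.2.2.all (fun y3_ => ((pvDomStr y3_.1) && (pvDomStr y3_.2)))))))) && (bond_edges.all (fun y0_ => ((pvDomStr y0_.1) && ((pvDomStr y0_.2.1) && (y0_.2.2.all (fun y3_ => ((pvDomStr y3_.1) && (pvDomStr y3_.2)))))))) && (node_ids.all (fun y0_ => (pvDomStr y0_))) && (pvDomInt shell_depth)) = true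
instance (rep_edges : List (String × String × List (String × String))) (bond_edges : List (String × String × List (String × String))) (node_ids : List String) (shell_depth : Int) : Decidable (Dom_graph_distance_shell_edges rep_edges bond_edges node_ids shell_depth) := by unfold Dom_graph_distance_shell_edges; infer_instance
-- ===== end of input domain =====

-- B replaces A's queue+distance-dict BFS by a level-synchronous frontier expansion that stops after
-- shell_depth rounds (objective: alternative decomposition; it never explores beyond the shell).

-- ===== PORT A =====
-- build_adjacency: defaultdict(set); adj[a].add(b); adj[b].add(a) (value-faithful: getD ∅ = defaultdict read)
def pvBuildAdjacency (edges : List (String × String × List (String × String))) :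
    PySem.Dict String (PySem.Set String) :=
  edges.foldl (fun adj e =>
    let adj := adj.insert e.1 (PySem.Set.add (adj.getD e.1 PySem.Set.empty) e.2.1)
    adj.insert e.2.1 (PySem.Set.add (adj.getD e.2.1 PySem.Set.empty) e.1)) PySem.Dict.empty

-- the 'while q:' loop; fuel only makes it total (it is proved sufficient), dist[x] read as getD x 0 (x is always a key)
def pvBfs (adj : PySem.Dict String (PySem.Set String)) :
    Nat → PySem.Dict String Int → List String → PySem.Dict String Int
  | 0, dist, _ => dist
  | _ + 1, dist, [] => dist
  | fuel + 1, dist, x :: q =>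
      let st := (adj.getD x PySem.Set.empty).foldl
        (fun (st : PySem.Dict String Int × List String) y =>
          if st.1.contains y then st
          else (st.1.insert y (st.1.getD x 0 + 1), st.2 ++ [y])) (dist, q)
      pvBfs adj fuel st.1 st.2

-- sorted(node_ids)[0] read as pyGet?/getD "" (Pre_ excludes the empty list, where Python raises IndexError)
def graph_distance_shell_edges (rep_edges : List (String × String × List (String × String))) (bond_edges : List (String × String × List (String × String))) (node_ids : List String) (shell_depth : Int) : List (String × String) :=
  let anchor := if node_ids.contains "c60_001" then "c60_001"
    else (PySem.List.pyGet? (PySem.List.sorted node_ids (fun x => x) false) 0).getD ""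
  let adj := pvBuildAdjacency bond_edges
  let dist := pvBfs adj (2 * bond_edges.length + 2) ((PySem.Dict.empty).insert anchor 0) [anchor]
  let shell := PySem.Set.ofList ((dist.items.filter (fun p => p.2 ≤ shell_depth)).map (fun p => p.1))
  PySem.Set.ofList ((rep_edges.filter (fun e => PySem.Set.contains shell e.1 || PySem.Set.contains shell e.2.1)).map (fun e => (e.1, e.2.1)))

-- ===== PORT B =====
-- adj.setdefault(a, []).append(b); adj.setdefault(b, []).append(a)
def pvAdjList (edges : List (String × String × List (String × String))) :
    PySem.Dict String (List String) :=
  edges.foldl (fun adj e =>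
    let adj := adj.insert e.1 (adj.getD e.1 [] ++ [e.2.1])
    adj.insert e.2.1 (adj.getD e.2.1 [] ++ [e.1])) PySem.Dict.empty

-- 'for _ in range(shell_depth): if not frontier: break; …' — structural recursion on the round count
def pvExpand (adj : PySem.Dict String (List String)) :
    Nat → PySem.Set String → PySem.Set String → PySem.Set String
  | 0, visited, _ => visited
  | k + 1, visited, frontier =>
      if frontier = [] then visited
      else
        let f' := frontier.foldl (fun s x =>
            (adj.getD x []).foldl
              (fun s y => if PySem.Set.contains visited y then s else PySem.Set.add s y) s)
          PySem.Set.empty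
        pvExpand adj k (PySem.Set.update visited f') f'

-- min(node_ids) read as min?/getD "" (Pre_ excludes the empty list, where Python raises ValueError)
def graph_distance_shell_edges_alt (rep_edges : List (String × String × List (String × String))) (bond_edges : List (String × String × List (String × String))) (node_ids : List String) (shell_depth : Int) : List (String × String) :=
  let anchor := if node_ids.contains "c60_001" then "c60_001"
    else (PySem.List.min? node_ids (fun x => x)).getD ""
  let visited :=
    if shell_depth < 0 then PySem.Set.empty
    else pvExpand (pvAdjList bond_edges) shell_depth.toNat
      (PySem.Set.add PySem.Set.empty anchor) (PySem.Set.add PySem.Set.empty anchor)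
  PySem.Set.ofList ((rep_edges.filter (fun e => PySem.Set.contains visited e.1 || PySem.Set.contains visited e.2.1)).map (fun e => (e.1, e.2.1)))

-- ===== PRECONDITION & SPEC =====
-- Pre_ excludes only node_ids = [] (and "c60_001" ∉ it, which [] implies): there A raises IndexError on sorted(node_ids)[0].
def Pre_graph_distance_shell_edges (rep_edges : List (String × String × List (String × String))) (bond_edges : List (String × String × List (String × String))) (node_ids : List String) (shell_depth : Int) : Prop := node_ids ≠ []
instance (rep_edges : List (String × String × List (String × String))) (bond_edges : List (String × String × List (String × String))) (node_ids : List String) (shell_depth : Int) : Decidable (Pre_graph_distance_shell_edges rep_edges bond_edges node_ids shell_depth) := by unfold Pre_graph_distance_shell_edges; infer_instance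

def pvWitness_graph_distance_shell_edges : (List (String × String × List (String × String))) × (List (String × String × List (String × String))) × List String × Int :=
  ([("a", "b", [])], [("a", "b", [])], ["a", "b"], 1)

def Spec_graph_distance_shell_edges (rep_edges : List (String × String × List (String × String))) (bond_edges : List (String × String × List (String × String))) (node_ids : List String) (shell_depth : Int) (out : List (String × String)) : Prop := out = graph_distance_shell_edges_alt rep_edges bond_edges node_ids shell_depth
instance (rep_edges : List (String × String × List (String × String))) (bond_edges : List (String × String × List (String × String))) (node_ids : List String) (shell_depth : Int) (out : List (String × String)) : Decidable (Spec_graph_distance_shell_edges rep_edges bond_edges node_ids shell_depth out) := by unfold Spec_graph_distance_shell_edges; infer_instance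

-- ===== CLAIM (what is proved, stated in full; the proofs are below) =====
def Claim_equal_graph_distance_shell_edges : Prop := ∀ (rep_edges : List (String × String × List (String × String))) (bond_edges : List (String × String × List (String × String))) (node_ids : List String) (shell_depth : Int), Dom_graph_distance_shell_edges rep_edges bond_edges node_ids shell_depth → Pre_graph_distance_shell_edges rep_edges bond_edges node_ids shell_depth → Spec_graph_distance_shell_edges rep_edges bond_edges node_ids shell_depth (graph_distance_shell_edges rep_edges bond_edges node_ids shell_depth)

-- ===== LEMMAS AND PROOFS =====

def pvNbr (be : List (String × String × List (String × String))) (u v : String) : Prop :=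
  ∃ e ∈ be, (u = e.1 ∧ v = e.2.1) ∨ (u = e.2.1 ∧ v = e.1)

def pvReach (be : List (String × String × List (String × String))) (anchor : String) : Nat → String → Prop
  | 0, n => n = anchor
  | k + 1, n => pvReach be anchor k n ∨ ∃ m, pvReach be anchor k m ∧ pvNbr be m n

lemma pvReach_mono (be : List (String × String × List (String × String))) (anchor : String)
    {k k' : Nat} (hk : k ≤ k') (n : String) (h : pvReach be anchor k n) : pvReach be anchor k' n := by
  induction hk with
  | refl => exact h
  | step _ ih => exact Or.inl ih

-- single-step effect of the A adjacency fold
lemma pvAdjStepA_mem (d : PySem.Dict String (PySem.Set String)) (a b x y : String) :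
    y ∈ ((d.insert a (PySem.Set.add (d.getD a PySem.Set.empty) b)).insert b
        (PySem.Set.add ((d.insert a (PySem.Set.add (d.getD a PySem.Set.empty) b)).getD b PySem.Set.empty) a)).getD x PySem.Set.empty ↔
      y ∈ d.getD x PySem.Set.empty ∨ (x = a ∧ y = b) ∨ (x = b ∧ y = a) := by
  by_cases hxb : x = b <;> by_cases hxa : x = a <;>
    simp [PySem.Dict.getD_insert, hxb, hxa, PySem.Set.mem_add] <;> subst_vars <;>
    simp_all [PySem.Set.mem_add]

lemma pvBuildAdjacency_mem_gen (be : List (String × String × List (String × String)))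
    (d : PySem.Dict String (PySem.Set String)) (x y : String) :
    y ∈ (be.foldl (fun adj e =>
      let adj := adj.insert e.1 (PySem.Set.add (adj.getD e.1 PySem.Set.empty) e.2.1)
      adj.insert e.2.1 (PySem.Set.add (adj.getD e.2.1 PySem.Set.empty) e.1)) d).getD x PySem.Set.empty ↔
    y ∈ d.getD x PySem.Set.empty ∨ pvNbr be x y := by
  induction be generalizing d with
  | nil => simp [pvNbr]
  | cons e rest ih =>
      simp only [List.foldl_cons]
      rw [ih]
      rw [pvAdjStepA_mem]
      constructor
      · rintro ((h | h) | h)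
        · exact Or.inl h
        · exact Or.inr ⟨e, List.mem_cons_self .., by tauto⟩
        · rcases h with ⟨m, hm, hp⟩; exact Or.inr ⟨m, List.mem_cons_of_mem _ hm, hp⟩
      · rintro (h | ⟨m, hm, hp⟩)
        · exact Or.inl (Or.inl h)
        · rcases List.mem_cons.mp hm with rfl | hm
          · exact Or.inl (Or.inr (by tauto))
          · exact Or.inr ⟨m, hm, hp⟩



lemma pvAdjStepB_mem (d : PySem.Dict String (List String)) (a b x y : String) :
    y ∈ ((d.insert a (d.getD a [] ++ [b])).insert b
        ((d.insert a (d.getD a [] ++ [b])).getD b [] ++ [a])).getD x [] ↔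
      y ∈ d.getD x [] ∨ (x = a ∧ y = b) ∨ (x = b ∧ y = a) := by
  by_cases hxb : x = b <;> by_cases hxa : x = a <;>
    simp [PySem.Dict.getD_insert, hxb, hxa] <;> subst_vars <;>
    simp_all

lemma pvAdjList_mem_gen (be : List (String × String × List (String × String)))
    (d : PySem.Dict String (List String)) (x y : String) :
    y ∈ (be.foldl (fun adj e =>
      let adj := adj.insert e.1 (adj.getD e.1 [] ++ [e.2.1])
      adj.insert e.2.1 (adj.getD e.2.1 [] ++ [e.1])) d).getD x [] ↔
    y ∈ d.getD x [] ∨ pvNbr be x y := by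
  induction be generalizing d with
  | nil => simp [pvNbr]
  | cons e rest ih =>
      simp only [List.foldl_cons]
      rw [ih, pvAdjStepB_mem]
      constructor
      · rintro ((h | h) | h)
        · exact Or.inl h
        · exact Or.inr ⟨e, List.mem_cons_self .., by tauto⟩
        · rcases h with ⟨m, hm, hp⟩; exact Or.inr ⟨m, List.mem_cons_of_mem _ hm, hp⟩
      · rintro (h | ⟨m, hm, hp⟩)
        · exact Or.inl (Or.inl h)
        · rcases List.mem_cons.mp hm with rfl | hm
          · exact Or.inl (Or.inr (by tauto))
          · exact Or.inr ⟨m, hm, hp⟩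

lemma pvBuildAdjacency_nodup_gen (be : List (String × String × List (String × String)))
    (d : PySem.Dict String (PySem.Set String)) (hd : ∀ x, (d.getD x PySem.Set.empty).Nodup) (x : String) :
    ((be.foldl (fun adj e =>
      let adj := adj.insert e.1 (PySem.Set.add (adj.getD e.1 PySem.Set.empty) e.2.1)
      adj.insert e.2.1 (PySem.Set.add (adj.getD e.2.1 PySem.Set.empty) e.1)) d).getD x PySem.Set.empty).Nodup := by
  induction be generalizing d with
  | nil => exact hd x
  | cons e rest ih =>
      simp only [List.foldl_cons]
      apply ih
      intro z
      by_cases hz1 : z = e.2.1 <;> by_cases hz2 : z = e.1 <;>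
        simp [PySem.Dict.getD_insert, hz1, hz2] <;> subst_vars <;>
        simp_all [PySem.Dict.getD_insert] <;>
        exact PySem.Set.nodup_add _ _ (hd _)





lemma pvInnerB_mem (visited : PySem.Set String) (L : List String) (s : PySem.Set String) (z : String) :
    z ∈ L.foldl (fun s y => if PySem.Set.contains visited y then s else PySem.Set.add s y) s ↔
      z ∈ s ∨ (z ∈ L ∧ z ∉ visited) := by
  induction L generalizing s with
  | nil => simp
  | cons y rest ih =>
      simp only [List.foldl_cons]
      by_cases hy : y ∈ visited
      · rw [if_pos (by simpa [PySem.Set.contains_iff] using hy)]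
        rw [ih]
        constructor
        · rintro (h | h) ; exact Or.inl h ; exact Or.inr ⟨List.mem_cons_of_mem _ h.1, h.2⟩
        · rintro (h | ⟨hz, hnv⟩)
          · exact Or.inl h
          · rcases List.mem_cons.mp hz with rfl | hz
            · exact absurd hy hnv
            · exact Or.inr ⟨hz, hnv⟩
      · rw [if_neg (by simpa [PySem.Set.contains_iff] using hy)]
        rw [ih]
        simp only [PySem.Set.mem_add, List.mem_cons]
        constructor
        · rintro ((h | rfl) | h)
          · exact Or.inl h
          · exact Or.inr ⟨Or.inl rfl, hy⟩
          · exact Or.inr ⟨Or.inr h.1, h.2⟩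
        · rintro (h | ⟨(rfl | hz), hnv⟩)
          · exact Or.inl (Or.inl h)
          · exact Or.inl (Or.inr rfl)
          · exact Or.inr ⟨hz, hnv⟩

lemma pvFrontierB_mem (adj : PySem.Dict String (List String)) (visited : PySem.Set String)
    (fr : List String) (s : PySem.Set String) (z : String) :
    z ∈ fr.foldl (fun s x =>
        (adj.getD x []).foldl
          (fun s y => if PySem.Set.contains visited y then s else PySem.Set.add s y) s) s ↔
      z ∈ s ∨ ∃ x ∈ fr, z ∈ adj.getD x [] ∧ z ∉ visited := by
  induction fr generalizing s with
  | nil => simp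
  | cons x rest ih =>
      simp only [List.foldl_cons]
      rw [ih, pvInnerB_mem]
      constructor
      · rintro ((h | h) | ⟨w, hw, hz⟩)
        · exact Or.inl h
        · exact Or.inr ⟨x, List.mem_cons_self .., h⟩
        · exact Or.inr ⟨w, List.mem_cons_of_mem _ hw, hz⟩
      · rintro (h | ⟨w, hw, hz⟩)
        · exact Or.inl (Or.inl h)
        · rcases List.mem_cons.mp hw with rfl | hw
          · exact Or.inl (Or.inr hz)
          · exact Or.inr ⟨w, hw, hz⟩

lemma pvReach_stable (be : List (String × String × List (String × String))) (anchor : String)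
    (v : List String) (i : Nat)
    (h1 : ∀ n, n ∈ v ↔ pvReach be anchor i n)
    (hc : ∀ x ∈ v, ∀ y, pvNbr be x y → y ∈ v) :
    ∀ j n, pvReach be anchor (i + j) n ↔ n ∈ v := by
  intro j
  induction j with
  | zero => intro n; simpa using (h1 n).symm
  | succ j ih =>
      intro n
      have hij : i + (j + 1) = (i + j) + 1 := by omega
      rw [hij]
      constructor
      · rintro (h | ⟨m, hm, hp⟩)
        · exact (ih n).mp h
        · exact hc m ((ih m).mp hm) n hp
      · intro h
        exact Or.inl ((ih n).mpr h)

lemma pvExpand_mem (be : List (String × String × List (String × String))) (anchor : String)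
    (adj : PySem.Dict String (List String))
    (hadj : ∀ x y, y ∈ adj.getD x [] ↔ pvNbr be x y) :
    ∀ (k i : Nat) (visited frontier : PySem.Set String),
    (∀ n, n ∈ visited ↔ pvReach be anchor i n) →
    (∀ n ∈ frontier, n ∈ visited) →
    (∀ x ∈ visited, ∀ y, pvNbr be x y → y ∈ visited ∨ ∃ z ∈ frontier, pvNbr be z y) →
    ∀ n, n ∈ pvExpand adj k visited frontier ↔ pvReach be anchor (i + k) n := by
  intro k
  induction k with
  | zero =>
      intro i visited frontier h1 _ _ n
      simpa [pvExpand] using h1 n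
  | succ k ih =>
      intro i visited frontier h1 h2 h3 n
      rw [pvExpand]
      by_cases hfr : frontier = []
      · rw [if_pos hfr]
        have hc : ∀ x ∈ visited, ∀ y, pvNbr be x y → y ∈ visited := by
          intro x hx y hp
          rcases h3 x hx y hp with h | ⟨z, hz, _⟩
          · exact h
          · simp [hfr] at hz
        exact (pvReach_stable be anchor visited i h1 hc (k + 1) n).symm
      · rw [if_neg hfr]
        have hf' : ∀ z, z ∈ frontier.foldl (fun s x =>
              (adj.getD x []).foldl
                (fun s y => if PySem.Set.contains visited y then s else PySem.Set.add s y) s)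
            PySem.Set.empty ↔ ∃ x ∈ frontier, pvNbr be x z ∧ z ∉ visited := by
          intro z
          rw [pvFrontierB_mem]
          simp only [PySem.Set.empty]
          constructor
          · rintro (h | ⟨x, hx, hz, hnv⟩)
            · simp at h
            · exact ⟨x, hx, (hadj x z).mp hz, hnv⟩
          · rintro ⟨x, hx, hnb, hnv⟩
            exact Or.inr ⟨x, hx, (hadj x z).mpr hnb, hnv⟩
        set f' := frontier.foldl (fun s x =>
              (adj.getD x []).foldl
                (fun s y => if PySem.Set.contains visited y then s else PySem.Set.add s y) s)
            PySem.Set.empty with hf'def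
        have h1' : ∀ m, m ∈ PySem.Set.update visited f' ↔ pvReach be anchor (i + 1) m := by
          intro m
          rw [PySem.Set.mem_update]
          constructor
          · rintro (h | h)
            · exact Or.inl ((h1 m).mp h)
            · rcases (hf' m).mp h with ⟨x, hx, hnb, _⟩
              exact Or.inr ⟨x, (h1 x).mp (h2 x hx), hnb⟩
          · rintro (h | ⟨m', hm', hnb⟩)
            · exact Or.inl ((h1 m).mpr h)
            · rcases h3 m' ((h1 m').mpr hm') m hnb with h | ⟨z, hz, hznb⟩
              · exact Or.inl h
              · by_cases hmv : m ∈ visited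
                · exact Or.inl hmv
                · exact Or.inr ((hf' m).mpr ⟨z, hz, hznb, hmv⟩)
        have h2' : ∀ m ∈ f', m ∈ PySem.Set.update visited f' := by
          intro m hm; exact (PySem.Set.mem_update ..).mpr (Or.inr hm)
        have h3' : ∀ x ∈ PySem.Set.update visited f', ∀ y, pvNbr be x y →
            y ∈ PySem.Set.update visited f' ∨ ∃ z ∈ f', pvNbr be z y := by
          intro x hx y hnb
          rcases (PySem.Set.mem_update ..).mp hx with hx | hx
          · rcases h3 x hx y hnb with h | ⟨z, hz, hznb⟩
            · exact Or.inl ((PySem.Set.mem_update ..).mpr (Or.inl h))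
            · by_cases hyv : y ∈ visited
              · exact Or.inl ((PySem.Set.mem_update ..).mpr (Or.inl hyv))
              · exact Or.inl ((PySem.Set.mem_update ..).mpr (Or.inr ((hf' y).mpr ⟨z, hz, hznb, hyv⟩)))
          · exact Or.inr ⟨x, hx, hnb⟩
        have := ih (i + 1) (PySem.Set.update visited f') f' h1' h2' h3' n
        rw [this]
        have : i + 1 + k = i + (k + 1) := by omega
        rw [this]


-- lookup in an association list made of appended blocks
lemma pvGet?_mk_append {ν : Type} (l₁ l₂ : List (String × ν)) (n : String) :
    (PySem.Dict.mk (l₁ ++ l₂)).get? n =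
      match (PySem.Dict.mk l₁).get? n with
      | some v => some v
      | none => (PySem.Dict.mk l₂).get? n := by
  induction l₁ with
  | nil => simp [PySem.Dict.get?]
  | cons p rest ih =>
      rcases p with ⟨k, v⟩
      rw [List.cons_append, PySem.Dict.get?_mk_cons, PySem.Dict.get?_mk_cons, ih]
      by_cases h : k == n <;> simp [h]

lemma pvGet?_mk_map_const {ν : Type} (r : List String) (c : ν) (n : String) :
    (PySem.Dict.mk (r.map (fun y => (y, c)))).get? n = if n ∈ r then some c else none := by
  induction r with
  | nil => simp [PySem.Dict.get?]
  | cons y rest ih =>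
      rw [List.map_cons, PySem.Dict.get?_mk_cons, ih]
      by_cases h : y = n
      · subst h; simp
      · simp [h, Ne.symm h]
      

lemma pvGet?_items_append {ν : Type} (d : PySem.Dict String ν) (l₂ : List (String × ν)) (n : String) :
    (PySem.Dict.mk (d.items ++ l₂)).get? n =
      match d.get? n with
      | some v => some v
      | none => (PySem.Dict.mk l₂).get? n := by
  cases d with
  | mk items => exact pvGet?_mk_append items l₂ n

-- the 'for y in adj[x]: if y not in dist: …' fold, characterised exactly
lemma pvBfsInner_eq (x : String) (dx : Int) :
    ∀ (L : List String) (d : PySem.Dict String Int) (qq : List String),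
    L.Nodup → d.get? x = some dx →
    L.foldl (fun (st : PySem.Dict String Int × List String) y =>
        if st.1.contains y then st
        else (st.1.insert y (st.1.getD x 0 + 1), st.2 ++ [y])) (d, qq) =
      (PySem.Dict.mk (d.items ++ (L.filter (fun y => !d.contains y)).map (fun y => (y, dx + 1))),
        qq ++ L.filter (fun y => !d.contains y)) := by
  intro L
  induction L with
  | nil => intro d qq _ _; simp
  | cons y rest ih =>
      intro d qq hnd hx
      rw [List.foldl_cons]
      by_cases hy : d.contains y
      · rw [if_pos hy]
        rw [ih d qq hnd.of_cons hx]
        simp [hy]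
      · rw [if_neg (by simp [hy])]
        have hgd : d.getD x 0 = dx := PySem.Dict.getD_of_get?_eq_some _ _ hx
        have hyx : y ≠ x := by
          intro h; subst h
          rw [PySem.Dict.contains_eq_isSome_get?, hx] at hy; simp at hy
        have hx' : (d.insert y (d.getD x 0 + 1)).get? x = some dx := by
          rw [PySem.Dict.get?_insert_of_ne _ _ (Ne.symm hyx)]; exact hx
        rw [ih _ _ hnd.of_cons hx']
        have hfilt : rest.filter (fun z => !(d.insert y (d.getD x 0 + 1)).contains z)
            = rest.filter (fun z => !d.contains z) := by
          apply List.filter_congr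
          intro z hz
          have hzy : ¬(z == y) := by
            have := (List.nodup_cons.mp hnd).1
            simp only [beq_iff_eq]
            intro h; subst h; exact this hz
          rw [PySem.Dict.contains_insert]
          simp [hzy]
        rw [hfilt]
        have hitems : (d.insert y (d.getD x 0 + 1)).items = d.items ++ [(y, dx + 1)] := by
          rw [PySem.Dict.items_insert_of_not_contains _ _ (by simp [hy]), hgd]
        have : PySem.Dict.mk ((d.insert y (d.getD x 0 + 1)).items ++
            (rest.filter (fun z => !d.contains z)).map (fun z => (z, dx + 1))) =
            PySem.Dict.mk (d.items ++ ((y :: rest).filter (fun z => !d.contains z)).map (fun z => (z, dx + 1))) := by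
          rw [hitems, List.filter_cons]
          simp [hy]
        rw [this, List.filter_cons]
        simp [hy]

-- fuel accounting: each newly discovered node leaves the undiscovered pool for good
lemma pvUndisCount (univ r : List String) (c c' : String → Bool) (hr : r.Nodup)
    (hrU : ∀ n ∈ r, n ∈ univ ∧ c n = false)
    (hc' : ∀ n, c' n = (c n || r.contains n)) :
    (univ.filter (fun n => !c' n)).length + r.length ≤ (univ.filter (fun n => !c n)).length := by
  have hS : univ.filter (fun n => !c' n) = (univ.filter (fun n => !c n)).filter (fun n => !r.contains n) := by
    rw [List.filter_filter]
    apply List.filter_congr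
    intro n _
    rw [hc']
    cases c n <;> cases h : r.contains n <;> simp
  rw [hS]
  set S := univ.filter (fun n => !c n) with hSdef
  have hsplit := List.length_eq_length_filter_add (l := S) (fun n => r.contains n)
  have hsub : List.Subperm r (S.filter (fun n => r.contains n)) := by
    apply List.subperm_of_subset hr
    intro n hn
    rw [List.mem_filter]
    constructor
    · rw [hSdef, List.mem_filter]
      exact ⟨(hrU n hn).1, by simp [(hrU n hn).2]⟩
    · simpa using hn
  have hlen := hsub.length_le
  omega

lemma pvNbr_right_mem (be : List (String × String × List (String × String))) (x y : String)
    (h : pvNbr be x y) : y ∈ be.flatMap (fun e => [e.1, e.2.1]) := by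
  rcases h with ⟨e, he, h | h⟩ <;> rcases h with ⟨_, rfl⟩ <;>
    exact List.mem_flatMap.mpr ⟨e, he, by simp⟩

-- the master BFS invariant induction: properties of the finished distance map
lemma pvBfs_props (be : List (String × String × List (String × String))) (anchor : String)
    (adj : PySem.Dict String (PySem.Set String))
    (hadj : ∀ x y, y ∈ adj.getD x PySem.Set.empty ↔ pvNbr be x y)
    (hnd : ∀ x, (adj.getD x PySem.Set.empty).Nodup) :
    ∀ (fuel : Nat) (dist : PySem.Dict String Int) (q : List String),
    dist.keys.Nodup →
    dist.get? anchor = some 0 →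
    (∀ n d, dist.get? n = some d → 0 ≤ d ∧ pvReach be anchor d.toNat n) →
    (∀ n ∈ q, dist.contains n = true) →
    (∀ p, dist.contains p = true → p ∉ q → ∀ y, pvNbr be p y →
      ∃ dy, dist.get? y = some dy ∧ dy ≤ dist.getD p 0 + 1) →
    List.Pairwise (fun a b => dist.getD a 0 ≤ dist.getD b 0 ∧ dist.getD b 0 ≤ dist.getD a 0 + 1) q →
    (∀ p, dist.contains p = true → p ∉ q → ∀ z ∈ q, dist.getD p 0 ≤ dist.getD z 0) →
    1 + q.length + ((anchor :: be.flatMap (fun e => [e.1, e.2.1])).filter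
        (fun n => !dist.contains n)).length ≤ fuel →
    (pvBfs adj fuel dist q).keys.Nodup ∧
    (pvBfs adj fuel dist q).get? anchor = some 0 ∧
    (∀ n d, (pvBfs adj fuel dist q).get? n = some d → 0 ≤ d ∧ pvReach be anchor d.toNat n) ∧
    (∀ p dp, (pvBfs adj fuel dist q).get? p = some dp → ∀ y, pvNbr be p y →
      ∃ dy, (pvBfs adj fuel dist q).get? y = some dy ∧ dy ≤ dp + 1) := by
  intro fuel
  induction fuel with
  | zero =>
      intro dist q _ _ _ _ _ _ _ hfuel
      omega
  | succ fuel ih =>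
      intro dist q hI0 hI1 hI2 hI3 hI4 hM12 hM3 hI5
      cases q with
      | nil =>
          simp only [pvBfs]
          refine ⟨hI0, hI1, hI2, ?_⟩
          intro p dp hp y hnbr
          have hc : dist.contains p = true := by
            rw [PySem.Dict.contains_eq_isSome_get?, hp]; rfl
          have := hI4 p hc (by simp) y hnbr
          rwa [PySem.Dict.getD_of_get?_eq_some _ _ hp] at this
      | cons x q =>
          have hcx : dist.contains x = true := hI3 x (List.mem_cons_self ..)
          obtain ⟨dx, hdx⟩ : ∃ dx, dist.get? x = some dx := by
            rw [PySem.Dict.contains_eq_isSome_get?] at hcx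
            exact Option.isSome_iff_exists.mp hcx
          have hL : (adj.getD x PySem.Set.empty).Nodup := hnd x
          rw [pvBfs, pvBfsInner_eq x dx _ dist q hL hdx]
          set L := adj.getD x PySem.Set.empty with hLdef
          set r := L.filter (fun y => !dist.contains y) with hrdef
          set dist' := PySem.Dict.mk (dist.items ++ r.map (fun y => (y, dx + 1))) with hd'def
          -- basic facts about r
          have hrNodup : r.Nodup := hL.filter _
          have hrNew : ∀ n ∈ r, dist.contains n = false ∧ n ∈ L := by
            intro n hn
            rcases List.mem_filter.mp hn with ⟨h1, h2⟩
            exact ⟨by simpa using h2, h1⟩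
          have hrNbr : ∀ n ∈ r, pvNbr be x n := fun n hn => (hadj x n).mp (hrNew n hn).2
          -- get? facts about dist'
          have hget_old : ∀ n v, dist.get? n = some v → dist'.get? n = some v := by
            intro n v h
            rw [hd'def, pvGet?_items_append, h]
          have hget_none : ∀ n, dist.get? n = none →
              dist'.get? n = if n ∈ r then some (dx + 1) else none := by
            intro n h
            rw [hd'def, pvGet?_items_append, h, pvGet?_mk_map_const]
          have hget_new : ∀ n ∈ r, dist'.get? n = some (dx + 1) := by
            intro n hn
            have hnone : dist.get? n = none := by
              have := (hrNew n hn).1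
              rw [PySem.Dict.contains_eq_isSome_get?] at this
              cases h : dist.get? n
              · rfl
              · rw [h] at this; simp at this
            rw [hget_none n hnone, if_pos hn]
          have hget_char : ∀ n v, dist'.get? n = some v →
              dist.get? n = some v ∨ (n ∈ r ∧ v = dx + 1) := by
            intro n v h
            cases hn : dist.get? n with
            | some w =>
                left
                rw [hget_old n w hn] at h
                exact h
            | none =>
                right
                rw [hget_none n hn] at h
                by_cases hmem : n ∈ r
                · rw [if_pos hmem] at h
                  exact ⟨hmem, by injection h; omega⟩
                · rw [if_neg hmem] at h; cases h
          have hcontains' : ∀ n, dist'.contains n = (dist.contains n || decide (n ∈ r)) := by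
            intro n
            rw [PySem.Dict.contains_eq_isSome_get?, PySem.Dict.contains_eq_isSome_get?]
            cases hn : dist.get? n with
            | some w => rw [hget_old n w hn]; rfl
            | none =>
                rw [hget_none n hn]
                by_cases hmem : n ∈ r
                · simp [hmem]
                · simp [hmem]
          have hkeys : dist'.keys = dist.keys ++ r := by
            rw [hd'def]
            show (dist.items ++ r.map (fun y => (y, dx + 1))).map Prod.fst = dist.items.map Prod.fst ++ r
            rw [List.map_append, List.map_map]
            simp [Function.comp_def]
          -- values preserved for old keys, getD forms
          have hgetD_old : ∀ n, dist.contains n = true → dist'.getD n 0 = dist.getD n 0 := by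
            intro n hn
            rw [PySem.Dict.contains_eq_isSome_get?] at hn
            obtain ⟨v, hv⟩ := Option.isSome_iff_exists.mp hn
            rw [PySem.Dict.getD_of_get?_eq_some _ _ hv,
              PySem.Dict.getD_of_get?_eq_some _ _ (hget_old n v hv)]
          have hgetD_x : dist'.getD x 0 = dx := PySem.Dict.getD_of_get?_eq_some _ _ (hget_old x dx hdx)
          have hgetD_r : ∀ n ∈ r, dist'.getD n 0 = dx + 1 := by
            intro n hn
            exact PySem.Dict.getD_of_get?_eq_some _ _ (hget_new n hn)
          have hdxval : dist.getD x 0 = dx := PySem.Dict.getD_of_get?_eq_some _ _ hdx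
          have hx0 : 0 ≤ dx ∧ pvReach be anchor dx.toNat x := hI2 x dx hdx
          -- the old queue values, from M12 head relation
          have hhead : ∀ b ∈ q, dx ≤ dist.getD b 0 ∧ dist.getD b 0 ≤ dx + 1 := by
            intro b hb
            have := (List.pairwise_cons.mp hM12).1 b hb
            rwa [hdxval] at this
          -- apply the induction hypothesis
          apply ih dist' (q ++ r)
          -- I0'
          · rw [hkeys]
            refine hI0.append hrNodup ?_
            intro n hn hnr
            have h1 := (hrNew n hnr).1
            have h2 := (PySem.Dict.contains_iff_mem_keys dist n).mpr hn
            rw [h1] at h2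
            cases h2
          -- I1'
          · exact hget_old anchor 0 hI1
          -- I2'
          · intro n d h
            rcases hget_char n d h with h | ⟨hn, rfl⟩
            · exact hI2 n d h
            · refine ⟨by omega, ?_⟩
              have : (dx + 1).toNat = dx.toNat + 1 := by omega
              rw [this]
              exact Or.inr ⟨x, hx0.2, hrNbr n hn⟩
          -- I3'
          · intro n hn
            rcases List.mem_append.mp hn with hn | hn
            · rw [hcontains' n, hI3 n (List.mem_cons_of_mem _ hn)]; rfl
            · rw [hcontains' n]; simp [hn]
          -- I4'
          · intro p hp hpq y hnbr
            have hpq' : p ∉ q ∧ p ∉ r := by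
              constructor <;> intro h <;> exact hpq (List.mem_append.mpr (by tauto))
            have hpold : dist.contains p = true := by
              rcases Bool.or_eq_true_iff.mp (hcontains' p ▸ hp) with h | h
              · exact h
              · exact absurd (of_decide_eq_true h) hpq'.2
            by_cases hpx : p = x
            · subst hpx
              -- p is the node just processed
              have hyL : y ∈ L := (hadj p y).mpr hnbr
              rw [hgetD_x]
              by_cases hyc : dist.contains y = true
              · obtain ⟨dy, hdy⟩ : ∃ dy, dist.get? y = some dy := by
                  rw [PySem.Dict.contains_eq_isSome_get?] at hyc
                  exact Option.isSome_iff_exists.mp hyc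
                refine ⟨dy, hget_old y dy hdy, ?_⟩
                have hdyval : dist.getD y 0 = dy := PySem.Dict.getD_of_get?_eq_some _ _ hdy
                by_cases hyq : y ∈ p :: q
                · rcases List.mem_cons.mp hyq with rfl | hyq
                  · rw [hdx] at hdy; injection hdy; omega
                  · have := (hhead y hyq).2; omega
                · have := hM3 y hyc hyq p (List.mem_cons_self ..)
                  rw [hdyval, hdxval] at this; omega
              · have hyr : y ∈ r := by
                  rw [hrdef]
                  exact List.mem_filter.mpr ⟨hyL, by simp [hyc]⟩
                exact ⟨dx + 1, hget_new y hyr, by omega⟩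
            · -- p was processed earlier
              have := hI4 p hpold (by
                intro h
                rcases List.mem_cons.mp h with h | h
                · exact hpx h
                · exact hpq'.1 h) y hnbr
              obtain ⟨dy, hdy, hle⟩ := this
              rw [hgetD_old p hpold]
              exact ⟨dy, hget_old y dy hdy, hle⟩
          -- M12'
          · rw [List.pairwise_append]
            refine ⟨?_, ?_, ?_⟩
            · -- within q: values unchanged
              have hq := (List.pairwise_cons.mp hM12).2
              refine hq.imp_of_mem ?_
              intro a b ha hb hab
              rw [hgetD_old a (hI3 a (List.mem_cons_of_mem _ ha)),
                hgetD_old b (hI3 b (List.mem_cons_of_mem _ hb))]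
              exact hab
            · -- within r: all values equal dx+1
              apply List.pairwise_of_forall_mem_list
              intro a ha b hb
              rw [hgetD_r a ha, hgetD_r b hb]
              omega
            · -- q before r
              intro a ha b hb
              rw [hgetD_old a (hI3 a (List.mem_cons_of_mem _ ha)), hgetD_r b hb]
              have := hhead a ha
              omega
          -- M3'
          · intro p hp hpq z hz
            have hpq' : p ∉ q ∧ p ∉ r := by
              constructor <;> intro h <;> exact hpq (List.mem_append.mpr (by tauto))
            have hpold : dist.contains p = true := by
              rcases Bool.or_eq_true_iff.mp (hcontains' p ▸ hp) with h | h
              · exact h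
              · exact absurd (of_decide_eq_true h) hpq'.2
            rw [hgetD_old p hpold]
            by_cases hpx : p = x
            · subst hpx
              rw [hdxval]
              rcases List.mem_append.mp hz with hz | hz
              · rw [hgetD_old z (hI3 z (List.mem_cons_of_mem _ hz))]
                exact (hhead z hz).1
              · rw [hgetD_r z hz]; omega
            · have hnotin : p ∉ x :: q := by
                intro h
                rcases List.mem_cons.mp h with h | h
                · exact hpx h
                · exact hpq'.1 h
              rcases List.mem_append.mp hz with hz | hz
              · rw [hgetD_old z (hI3 z (List.mem_cons_of_mem _ hz))]
                exact hM3 p hpold hnotin z (List.mem_cons_of_mem _ hz)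
              · rw [hgetD_r z hz]
                have := hM3 p hpold hnotin x (List.mem_cons_self ..)
                rw [hdxval] at this
                omega
          -- I5'
          · have hcount := pvUndisCount (anchor :: be.flatMap (fun e => [e.1, e.2.1])) r
              (fun n => dist.contains n) (fun n => dist'.contains n) hrNodup
              (by
                intro n hn
                refine ⟨List.mem_cons_of_mem _ (pvNbr_right_mem be x n (hrNbr n hn)), (hrNew n hn).1⟩)
              (by
                intro n
                by_cases hmem : n ∈ r
                · simp [hcontains' n, hmem]
                · simp [hcontains' n, hmem])
            have hcount' : ((anchor :: be.flatMap (fun e => [e.1, e.2.1])).filter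
                  (fun n => !dist'.contains n)).length + r.length ≤
                ((anchor :: be.flatMap (fun e => [e.1, e.2.1])).filter
                  (fun n => !dist.contains n)).length := hcount
            rw [List.length_append]
            simp only [List.length_cons] at hI5
            omega

-- completeness: everything reachable within k steps is in the distance map with value ≤ k
lemma pvReach_le_dist (be : List (String × String × List (String × String))) (anchor : String)
    (D : PySem.Dict String Int)
    (h0 : D.get? anchor = some 0)
    (hstep : ∀ p dp, D.get? p = some dp → ∀ y, pvNbr be p y →
      ∃ dy, D.get? y = some dy ∧ dy ≤ dp + 1) :
    ∀ (k : Nat) (n : String), pvReach be anchor k n → ∃ d, D.get? n = some d ∧ d ≤ (k : Int) := by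
  intro k
  induction k with
  | zero =>
      intro n h
      cases h
      exact ⟨0, h0, by omega⟩
  | succ k ih =>
      intro n h
      rcases h with h | ⟨m, hm, hnb⟩
      · obtain ⟨d, hd, hle⟩ := ih n h
        exact ⟨d, hd, by push_cast; omega⟩
      · obtain ⟨dm, hdm, hlem⟩ := ih m hm
        obtain ⟨dn, hdn, hlen⟩ := hstep m dm hdm n hnb
        exact ⟨dn, hdn, by push_cast; omega⟩

-- sorted(node_ids)[0] and min(node_ids) are the same string
lemma pvAnchor_eq (node_ids : List String) (hne : node_ids ≠ []) :
    (PySem.List.pyGet? (PySem.List.sorted node_ids (fun x => x) false) 0).getD "" =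
      (PySem.List.min? node_ids (fun x => x)).getD "" := by
  obtain ⟨m, hm⟩ : ∃ m, PySem.List.min? node_ids (fun x => x) = some m := by
    cases h : PySem.List.min? node_ids (fun x => x) with
    | some m => exact ⟨m, rfl⟩
    | none => exact absurd ((PySem.List.min?_eq_none_iff node_ids (fun x => x)).mp h) hne
  have hsne : PySem.List.sorted node_ids (fun x => x) false ≠ [] := by
    intro h
    exact hne ((PySem.List.sorted_eq_nil_iff node_ids (fun x => x) false).mp h)
  have hlen : 0 < (PySem.List.sorted node_ids (fun x => x) false).length :=
    List.length_pos_iff.mpr hsne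
  rw [PySem.List.pyGet?_zero, List.getElem?_eq_getElem hlen, hm]
  show (PySem.List.sorted node_ids (fun x => x) false)[0] = m
  have hperm := PySem.List.sorted_perm node_ids (fun x => x) false
  apply le_antisymm
  · -- sorted[0] ≤ m since m occurs in the sorted list
    have hmem : m ∈ PySem.List.sorted node_ids (fun x => x) false :=
      hperm.mem_iff.mpr (PySem.List.min?_mem hm)
    obtain ⟨j, hj, hjm⟩ := List.getElem_of_mem hmem
    rw [← hjm]
    exact PySem.List.sorted_id_getElem_mono node_ids (Nat.zero_le j) hj
  · -- m ≤ sorted[0] since sorted[0] ∈ node_ids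
    exact PySem.List.min?_isMin hm _ (hperm.mem_iff.mp (List.getElem_mem hlen))

lemma pvUnivLen (be : List (String × String × List (String × String))) :
    (be.flatMap (fun e => [e.1, e.2.1])).length = 2 * be.length := by
  induction be with
  | nil => simp
  | cons e rest ih => simp [List.flatMap_cons, ih]; omega

-- both pipelines agree for ANY anchor node
lemma pvPipeline_eq (rep_edges bond_edges : List (String × String × List (String × String)))
    (shell_depth : Int) (anchor : String) :
    (let adj := pvBuildAdjacency bond_edges
     let dist := pvBfs adj (2 * bond_edges.length + 2) ((PySem.Dict.empty).insert anchor 0) [anchor]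
     let shell := PySem.Set.ofList ((dist.items.filter (fun p => p.2 ≤ shell_depth)).map (fun p => p.1))
     PySem.Set.ofList ((rep_edges.filter (fun e => PySem.Set.contains shell e.1 || PySem.Set.contains shell e.2.1)).map (fun e => (e.1, e.2.1)))) =
    (let visited :=
       if shell_depth < 0 then PySem.Set.empty
       else pvExpand (pvAdjList bond_edges) shell_depth.toNat
         (PySem.Set.add PySem.Set.empty anchor) (PySem.Set.add PySem.Set.empty anchor)
     PySem.Set.ofList ((rep_edges.filter (fun e => PySem.Set.contains visited e.1 || PySem.Set.contains visited e.2.1)).map (fun e => (e.1, e.2.1)))) := by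
  simp only []
  set be := bond_edges
  -- A-side adjacency facts
  have hadjA : ∀ x y, y ∈ (pvBuildAdjacency be).getD x PySem.Set.empty ↔ pvNbr be x y := by
    intro x y
    rw [pvBuildAdjacency, pvBuildAdjacency_mem_gen]
    simp [PySem.Dict.getD_empty]
  have hndA : ∀ x, ((pvBuildAdjacency be).getD x PySem.Set.empty).Nodup := by
    intro x
    rw [pvBuildAdjacency]
    exact pvBuildAdjacency_nodup_gen be PySem.Dict.empty (by simp [PySem.Dict.getD_empty]) x
  -- initial invariants for the BFS
  have hbfs := pvBfs_props be anchor (pvBuildAdjacency be) hadjA hndA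
    (2 * be.length + 2) ((PySem.Dict.empty).insert anchor 0) [anchor]
    (by
      rw [PySem.Dict.keys_insert_of_not_contains _ _ (by simp [PySem.Dict.contains_empty])]
      simp [PySem.Dict.keys_empty])
    (PySem.Dict.get?_insert_self _ _ _)
    (by
      intro n d h
      rw [PySem.Dict.get?_insert] at h
      by_cases hn : n = anchor
      · rw [if_pos hn] at h
        injection h with h'
        subst hn
        exact ⟨by omega, by simp [← h', pvReach]⟩
      · rw [if_neg hn, PySem.Dict.get?_empty] at h; cases h)
    (by
      intro n hn
      rcases List.mem_cons.mp hn with rfl | h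
      · exact PySem.Dict.contains_insert_self _ _ _
      · cases h)
    (by
      intro p hp hpq y hnbr
      exfalso
      rw [PySem.Dict.contains_insert, PySem.Dict.contains_empty] at hp
      simp at hp
      exact hpq (by simp [hp]))
    (List.pairwise_singleton _ _)
    (by
      intro p hp hpq z hz
      exfalso
      rw [PySem.Dict.contains_insert, PySem.Dict.contains_empty] at hp
      simp at hp
      exact hpq (by simp [hp]))
    (by
      have hfc : ((anchor :: be.flatMap (fun e => [e.1, e.2.1])).filter
            (fun n => !((PySem.Dict.empty.insert anchor (0 : Int)).contains n))) =
          ((be.flatMap (fun e => [e.1, e.2.1])).filter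
            (fun n => !((PySem.Dict.empty.insert anchor (0 : Int)).contains n))) := by
        rw [List.filter_cons]
        rw [PySem.Dict.contains_insert_self]
        simp
      rw [hfc]
      have h1 := List.length_filter_le
        (fun n => !((PySem.Dict.empty.insert anchor (0 : Int)).contains n))
        (be.flatMap (fun e => [e.1, e.2.1]))
      have h2 := pvUnivLen be
      simp only [List.length_singleton]
      omega)
  obtain ⟨hF0, hF1, hF2, hF3⟩ := hbfs
  set D := pvBfs (pvBuildAdjacency be) (2 * be.length + 2) ((PySem.Dict.empty).insert anchor 0) [anchor]
  -- shell membership on the A side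
  have hshellA : ∀ n, n ∈ PySem.Set.ofList ((D.items.filter (fun p => p.2 ≤ shell_depth)).map (fun p => p.1)) ↔
      ∃ d, D.get? n = some d ∧ d ≤ shell_depth := by
    intro n
    rw [PySem.Set.mem_ofList]
    constructor
    · intro h
      obtain ⟨p, hp, hpn⟩ := List.mem_map.mp h
      rcases List.mem_filter.mp hp with ⟨hpi, hple⟩
      refine ⟨p.2, ?_, by simpa using hple⟩
      rw [PySem.Dict.get?_eq_some_iff_mem_items _ _ _ hF0]
      rw [← hpn]
      exact hpi
    · rintro ⟨d, hd, hle⟩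
      apply List.mem_map.mpr
      refine ⟨(n, d), List.mem_filter.mpr ⟨?_, by simpa using hle⟩, rfl⟩
      exact (PySem.Dict.get?_eq_some_iff_mem_items _ _ _ hF0).mp hd
  -- membership on the B side
  have hadjB : ∀ x y, y ∈ (pvAdjList be).getD x [] ↔ pvNbr be x y := by
    intro x y
    rw [pvAdjList, pvAdjList_mem_gen]
    simp [PySem.Dict.getD_empty]
  have hvisited : ∀ n, n ∈ (if shell_depth < 0 then PySem.Set.empty
      else pvExpand (pvAdjList be) shell_depth.toNat
        (PySem.Set.add PySem.Set.empty anchor) (PySem.Set.add PySem.Set.empty anchor)) ↔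
      (0 ≤ shell_depth ∧ pvReach be anchor shell_depth.toNat n) := by
    intro n
    by_cases hs : shell_depth < 0
    · rw [if_pos hs]
      simp only [PySem.Set.empty]
      constructor
      · intro h; simp at h
      · rintro ⟨h, _⟩; omega
    · rw [if_neg hs]
      rw [pvExpand_mem be anchor (pvAdjList be) hadjB shell_depth.toNat 0
          (PySem.Set.add PySem.Set.empty anchor) (PySem.Set.add PySem.Set.empty anchor)
          (by
            intro m
            simp only [PySem.Set.add, PySem.Set.empty, PySem.Set.contains]
            constructor
            · intro h
              simp at h
              simp [pvReach, h]
            · intro h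
              simp [pvReach] at h
              simp [h])
          (fun m hm => hm)
          (by
            intro x hx y hnb
            exact Or.inr ⟨x, hx, hnb⟩) n]
      simp only [Nat.zero_add]
      constructor
      · intro h; exact ⟨by omega, h⟩
      · rintro ⟨_, h⟩; exact h
  -- the two membership tests agree
  have hmem : ∀ n, (∃ d, D.get? n = some d ∧ d ≤ shell_depth) ↔
      (0 ≤ shell_depth ∧ pvReach be anchor shell_depth.toNat n) := by
    intro n
    constructor
    · rintro ⟨d, hd, hle⟩
      obtain ⟨hd0, hreach⟩ := hF2 n d hd
      refine ⟨by omega, ?_⟩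
      exact pvReach_mono be anchor (by omega) n hreach
    · rintro ⟨hs, hreach⟩
      obtain ⟨d, hd, hle⟩ := pvReach_le_dist be anchor D hF1 hF3 shell_depth.toNat n hreach
      refine ⟨d, hd, ?_⟩
      rw [Int.toNat_of_nonneg hs] at hle
      exact hle
  -- conclude: the two result sets are built from identical filtered lists
  have hcont : ∀ n, PySem.Set.contains (PySem.Set.ofList ((D.items.filter (fun p => p.2 ≤ shell_depth)).map (fun p => p.1))) n =
      PySem.Set.contains (if shell_depth < 0 then PySem.Set.empty
        else pvExpand (pvAdjList be) shell_depth.toNat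
          (PySem.Set.add PySem.Set.empty anchor) (PySem.Set.add PySem.Set.empty anchor)) n := by
    intro n
    rw [Bool.eq_iff_iff, PySem.Set.contains_iff, PySem.Set.contains_iff]
    rw [hshellA n, hvisited n]
    exact hmem n
  congr 1
  congr 1
  apply List.filter_congr
  intro e _
  rw [hcont e.1, hcont e.2.1]

lemma pvMain (rep_edges bond_edges : List (String × String × List (String × String)))
    (node_ids : List String) (shell_depth : Int) (hPre : node_ids ≠ []) :
    graph_distance_shell_edges rep_edges bond_edges node_ids shell_depth =
      graph_distance_shell_edges_alt rep_edges bond_edges node_ids shell_depth := by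
  have hanch : (if node_ids.contains "c60_001" then "c60_001"
      else (PySem.List.min? node_ids (fun x => x)).getD "") =
      (if node_ids.contains "c60_001" then "c60_001"
      else (PySem.List.pyGet? (PySem.List.sorted node_ids (fun x => x) false) 0).getD "") := by
    by_cases h : node_ids.contains "c60_001"
    · rw [if_pos h, if_pos h]
    · rw [if_neg h, if_neg h, pvAnchor_eq node_ids hPre]
  rw [graph_distance_shell_edges, graph_distance_shell_edges_alt]
  rw [hanch]
  exact pvPipeline_eq rep_edges bond_edges shell_depth _

-- ===== VERDICT (by name: the statement is the Claim_ definition above) =====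
theorem graph_distance_shell_edges_spec : Claim_equal_graph_distance_shell_edges := by
  intro rep_edges bond_edges node_ids shell_depth _ hPre
  exact pvMain rep_edges bond_edges node_ids shell_depth hPre
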